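-- pv_equiv track=rewrite | github.com/Qondor/Python-Daily-Challenge | Daily Challenges/Daily Challenge #39 - Virus/virus.py | virus_remover
-- ===== SOURCE A (Python) =====
-- def virus_remover(input_text):
--     """
--
--     """
--     x = 0
--     result = ""
--     changed_word = ""
--     if input_text[-1] == ".":
--         input_text = input_text[0] + input_text[1:-1].lower() + "."
--     else:
--         input_text = input_text[0] + input_text[1:-1].lower()
--     input_text = input_text.split()
--     for word in input_text:
--         while x < (len(word) - 1):
--             if word[x] == "i" and word[x+1] == "e":
--                 word = list(word)
--                 temp = word[x]
--                 word[x] = word[x+1]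
--                 word[x+1] = temp
--                 word = changed_word.join(word)
--
--             x += 1
--         x = 0
--         result += f'{word} '
--
--
--
--     return result
-- ===== SOURCE B (Python) =====
-- def _fix(word):
--     out = []
--     n = len(word)
--     j = 0
--     while j < n:
--         if word[j] == 'i':
--             k = j + 1
--             while k < n and word[k] == 'e':
--                 k += 1
--             if k > j + 1:
--                 out.append(word[j+1:k])
--                 out.append('i')
--                 j = k
--                 continue
--         out.append(word[j])
--         j += 1
--     return ''.join(out)
--
-- def virus_remover(input_text):
--     head = input_text[0]
--     mid = input_text[1:-1].lower()
--     tail = "." if input_text[-1] == "." else ""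
--     return ''.join(_fix(w) + ' ' for w in (head + mid + tail).split())
-- ===== Notes on version B (the rewrite author's own statement) =====
-- stated objective: alternative
-- what changed: The in-place adjacent-swap while-loop (which bubbles each occurrence rightward one swap at a time, rebuilding the word list on every swap) is replaced by a single emitting pass that scans each word once and outputs every swap-target character after the run it bubbles past; the setup (period test, slicing, lowercasing, split, trailing-space join) is kept.
-- outside the precondition, e.g. on virus_remover(''): A raises IndexError, B raises IndexError
import Mathlib
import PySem

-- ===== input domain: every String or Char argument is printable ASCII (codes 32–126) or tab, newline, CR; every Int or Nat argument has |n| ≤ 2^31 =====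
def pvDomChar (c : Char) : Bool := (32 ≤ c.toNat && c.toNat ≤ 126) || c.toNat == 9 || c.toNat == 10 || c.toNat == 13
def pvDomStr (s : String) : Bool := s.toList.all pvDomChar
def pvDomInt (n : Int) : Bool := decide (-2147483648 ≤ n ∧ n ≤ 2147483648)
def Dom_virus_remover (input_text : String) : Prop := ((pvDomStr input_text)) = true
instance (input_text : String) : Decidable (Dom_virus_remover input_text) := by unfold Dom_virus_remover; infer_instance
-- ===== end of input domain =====

-- B replaces A's index-walking adjacent-swap while-loop by a recursive pass that
-- emits each 'i' followed by a run of 'e's as the e-run then 'i' (objective: simpler).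


-- ===== PORT A =====
-- A's inner while-loop over one word: x walks right; on word[x]='i', word[x+1]='e'
-- the two characters are swapped in place (Python's list(word) / ''.join(word) are
-- ported as the char list itself, which is exact).
def virusSwapLoop (word : List Char) (x : Nat) : List Char :=
  if x < word.length - 1 then
    if word.getD x ' ' = 'i' ∧ word.getD (x + 1) ' ' = 'e' then
      let temp := word.getD x ' '
      virusSwapLoop ((word.set x (word.getD (x + 1) ' ')).set (x + 1) temp) (x + 1)
    else
      virusSwapLoop word (x + 1)
  else word
termination_by word.length - x
decreasing_by all_goals simp_all; omega

-- input_text[0] is evaluated only when input_text[-1] succeeded, so the string is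
-- nonempty and getD never uses its default there (exact).
def virus_remover (input_text : String) : String :=
  match PySem.Str.pyGet? input_text (-1) with
  | none => ""
  | some last =>
    let head := (PySem.Str.pyGet? input_text 0).getD ' '
    let mid := PySem.Chars.lower (PySem.List.slice input_text.toList (some 1) (some (-1)))
    let t := if last = '.' then head :: mid ++ ['.'] else head :: mid
    let words := PySem.Chars.split₀ t
    String.ofList (words.foldl (fun (result : List Char) w => result ++ virusSwapLoop w 0 ++ [' ']) [])

-- ===== PORT B =====
-- inner 'while k < n and word[k] == 'e'' of _fix in Source B: advance k past the run of 'e's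
def eRun (word : List Char) (k : Nat) : Nat :=
  if _h : k < word.length ∧ word.getD k ' ' = 'e' then eRun word (k + 1) else k
termination_by word.length - k
decreasing_by omega

-- the while-loop of _fix in Source B: j walks the word, appending to the output buffer
-- (the buffer of string pieces is ported as the concatenated char list, which is
-- exactly what ''.join(out) produces; word[j+1:k] with 0 ≤ j+1 ≤ k is the
-- take/drop below)
def fixGo (word : List Char) (j : Nat) (out : List Char) : List Char :=
  if j < word.length then
    if _h : word.getD j ' ' = 'i' ∧ j + 1 < eRun word (j + 1) then
      fixGo word (eRun word (j + 1))
        (out ++ (word.drop (j + 1)).take (eRun word (j + 1) - (j + 1)) ++ ['i'])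
    else
      fixGo word (j + 1) (out ++ [word.getD j ' '])
  else out
termination_by word.length - j
decreasing_by
  · have := _h.2
    omega
  · omega

def virus_remover_alt (input_text : String) : String :=
  match PySem.Str.pyGet? input_text 0 with
  | none => ""
  | some head =>
    let mid := PySem.Chars.lower (PySem.List.slice input_text.toList (some 1) (some (-1)))
    let tail := if (PySem.Str.pyGet? input_text (-1)).getD ' ' = '.' then ['.'] else []
    String.ofList (PySem.Chars.join []
      ((PySem.Chars.split₀ (head :: mid ++ tail)).map (fun w => fixGo w 0 [] ++ [' '])))

-- ===== PRECONDITION & SPEC =====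
-- Pre_ excludes only the empty string, on which both Pythons raise IndexError.
def Pre_virus_remover (input_text : String) : Prop := input_text ≠ ""
instance (input_text : String) : Decidable (Pre_virus_remover input_text) := by
  unfold Pre_virus_remover; infer_instance
def pvWitness_virus_remover : String := "Virus tries to DIE."

def Spec_virus_remover (input_text : String) (out : String) : Prop := out = virus_remover_alt input_text
instance (input_text : String) (out : String) : Decidable (Spec_virus_remover input_text out) := by unfold Spec_virus_remover; infer_instance

-- ===== CLAIM (what is proved, stated in full; the proofs are below) =====
def Claim_equal_virus_remover : Prop := ∀ (input_text : String), Dom_virus_remover input_text → Pre_virus_remover input_text → Spec_virus_remover input_text (virus_remover input_text)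

-- ===== LEMMAS AND PROOFS =====

-- proof-side reference form of B's pass: emit each 'i' past its run of 'e's
def countE : List Char → Nat
  | c :: rest => if c = 'e' then countE rest + 1 else 0
  | [] => 0

def fixWord : List Char → List Char
  | [] => []
  | c :: rest =>
    if c = 'i' ∧ 0 < countE rest then
      rest.take (countE rest) ++ 'i' :: fixWord (rest.drop (countE rest))
    else c :: fixWord rest
termination_by l => l.length
decreasing_by all_goals simp


lemma countE_of_ne {d : Char} (t : List Char) (h : d ≠ 'e') : countE (d :: t) = 0 := by
  simp [countE, h]

lemma fixWord_ie (rest : List Char) :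
    fixWord ('i' :: 'e' :: rest) = 'e' :: fixWord ('i' :: rest) := by
  rw [fixWord]
  conv_rhs => rw [fixWord]
  by_cases h : 0 < countE rest
  · simp [countE, h]
  · have h0 : countE rest = 0 := Nat.eq_zero_of_not_pos h
    rw [fixWord]
    simp [countE, h0]

lemma fixWord_short (l : List Char) (h : l.length ≤ 1) : fixWord l = l := by
  match l with
  | [] => rw [fixWord]
  | [c] => rw [fixWord]; simp [countE, fixWord]
  | a :: b :: t => simp at h

lemma fixWord_cons_of_not (c d : Char) (t : List Char) (h : ¬ (c = 'i' ∧ d = 'e')) :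
    fixWord (c :: d :: t) = c :: fixWord (d :: t) := by
  rw [fixWord]
  by_cases hc : c = 'i'
  · have hd : d ≠ 'e' := by tauto
    simp [hc, countE_of_ne t hd]
  · simp [hc]

-- A's swap walk equals B's emitting pass on the unprocessed suffix
lemma virusSwapLoop_eq : ∀ (word : List Char) (x : Nat),
    virusSwapLoop word x = word.take x ++ fixWord (word.drop x)
  | word, x => by
    rw [virusSwapLoop]
    by_cases hx : x < word.length - 1
    · have hx1 : x + 1 < word.length := by omega
      have hx0 : x < word.length := by omega
      have hpre : (word.take x).length = x := by simp; omega
      have hw : word = word.take x ++ word[x] :: word[x+1] :: word.drop (x+2) := by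
        conv_lhs => rw [← List.take_append_drop x word]
        rw [List.drop_eq_getElem_cons hx0, List.drop_eq_getElem_cons hx1]
      have hgx : word.getD x ' ' = word[x] := List.getD_eq_getElem word ' ' hx0
      have hgx1 : word.getD (x+1) ' ' = word[x+1] := List.getD_eq_getElem word ' ' hx1
      simp only [hx, if_true, hgx, hgx1]
      by_cases h : word[x] = 'i' ∧ word[x+1] = 'e'
      · simp only [h, and_self, if_true]
        rw [virusSwapLoop_eq _ (x+1)]
        have hset : (word.set x 'e').set (x+1) 'i' =
            word.take x ++ 'e' :: 'i' :: word.drop (x+2) := by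
          conv_lhs => rw [hw]
          rw [List.set_append_right _ _ (by omega), List.set_append_right _ _ (by omega)]
          simp [hpre]
          rw [List.drop_eq_getElem_cons hx0, List.drop_eq_getElem_cons hx1]
          rfl
        have hdx : word.drop x = 'i' :: 'e' :: word.drop (x+2) := by
          rw [List.drop_eq_getElem_cons hx0, List.drop_eq_getElem_cons hx1, h.1, h.2]
        rw [hset, hdx, fixWord_ie]
        have hx' : x + 1 = (word.take x).length + 1 := by omega
        have h1 : List.take ((word.take x).length + 1) (word.take x) = word.take x :=
          List.take_of_length_le (by simp)
        have h2 : List.drop ((word.take x).length + 1) (word.take x) = ([] : List Char) :=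
          List.drop_eq_nil_of_le (by simp)
        rw [hx', List.take_append, List.drop_append, h1, h2]
        simp
      · simp only [h, if_false]
        rw [virusSwapLoop_eq _ (x+1)]
        have ht : word.take (x+1) = word.take x ++ [word[x]] := by
          rw [List.take_add_one, List.getElem?_eq_getElem hx0]; rfl
        have hd : word.drop (x+1) = word[x+1] :: word.drop (x+2) := List.drop_eq_getElem_cons hx1
        have hdx : word.drop x = word[x] :: word[x+1] :: word.drop (x+2) := by
          rw [List.drop_eq_getElem_cons hx0, hd]
        rw [hdx, fixWord_cons_of_not _ _ _ h, ← hd, ht]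
        simp only [List.append_assoc, List.cons_append, List.nil_append]

    · simp only [hx, if_false]
      have : (word.drop x).length ≤ 1 := by simp; omega
      rw [fixWord_short _ this, List.take_append_drop]
termination_by word x => word.length - x
decreasing_by all_goals ((try simp only [List.length_set]); omega)

lemma join_nil_flatten (ps : List (List Char)) : PySem.Chars.join [] ps = ps.flatten := by
  show List.intercalate [] ps = ps.flatten
  induction ps with
  | nil => simp [List.intercalate]
  | cons p ps ih => cases ps <;> simp_all [List.intercalate]

lemma eRun_eq : ∀ (word : List Char) (k : Nat), eRun word k = k + countE (word.drop k)
  | word, k => by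
    rw [eRun]
    by_cases hk : k < word.length
    · have hdk : word.drop k = word[k] :: word.drop (k+1) := List.drop_eq_getElem_cons hk
      have hg : word.getD k ' ' = word[k] := List.getD_eq_getElem word ' ' hk
      by_cases he : word[k] = 'e'
      · simp only [hk, hg, he, and_self, dif_pos]
        rw [eRun_eq word (k+1), hdk, he, countE]
        simp
        omega
      · simp only [hk, hg, he, and_false, dif_neg, not_false_iff]
        rw [hdk, countE_of_ne _ he]
        omega
    · have : word.drop k = [] := List.drop_eq_nil_of_le (by omega)
      simp [hk, this, countE]
termination_by word k => word.length - k
decreasing_by omega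

lemma fixGo_eq : ∀ (word : List Char) (j : Nat) (out : List Char),
    fixGo word j out = out ++ fixWord (word.drop j)
  | word, j, out => by
    rw [fixGo]
    by_cases hj : j < word.length
    · have hdj : word.drop j = word[j] :: word.drop (j+1) := List.drop_eq_getElem_cons hj
      have hg : word.getD j ' ' = word[j] := List.getD_eq_getElem word ' ' hj
      have hm : eRun word (j+1) = j + 1 + countE (word.drop (j+1)) := eRun_eq word (j+1)
      simp only [hj, if_true]
      split
      · rename_i h
        rw [fixGo_eq word (eRun word (j+1)) _]
        rw [hdj, fixWord]
        have hc : word[j] = 'i' := by rw [← hg]; exact h.1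
        have hcnt : 0 < countE (word.drop (j+1)) := by omega
        simp only [hc, hcnt, and_self, if_pos]
        rw [hm]
        have : j + 1 + countE (word.drop (j+1)) - (j+1) = countE (word.drop (j+1)) := by omega
        rw [this, ← List.drop_drop]
        simp
      · rename_i h
        rw [fixGo_eq word (j+1) _]
        rw [hdj, fixWord]
        have : ¬ (word[j] = 'i' ∧ 0 < countE (word.drop (j+1))) := by
          intro hco
          exact h ⟨by rw [hg]; exact hco.1, by omega⟩
        simp only [this, if_neg, not_false_iff, hg]
        simp
    · have hdj : word.drop j = [] := List.drop_eq_nil_of_le (by omega)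
      rw [if_neg hj, hdj, fixWord]
      simp
termination_by word j _ => word.length - j
decreasing_by
  all_goals simp_all
  · omega
  · exact Nat.sub_lt_sub_left (by omega) (by have := (‹word[j] = 'i' ∧ 0 < countE (List.drop (j + 1) word)›).2; omega)

lemma fix_eq (w : List Char) : fixGo w 0 [] = fixWord w := by
  rw [fixGo_eq]
  simp

-- A's result accumulation equals B's join over the fixed words
lemma perWord (words : List (List Char)) :
    words.foldl (fun (result : List Char) w => result ++ virusSwapLoop w 0 ++ [' ']) []
      = PySem.Chars.join [] (words.map (fun w => fixWord w ++ [' '])) := by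
  have h : (fun (result : List Char) w => result ++ virusSwapLoop w 0 ++ [' '])
      = fun (result : List Char) w => result ++ (fixWord w ++ [' ']) := by
    funext r w
    rw [virusSwapLoop_eq w 0]
    simp
  rw [h, PySem.List.foldl_append_eq_flatMap]
  simp
  rw [join_nil_flatten, List.flatMap_def]

-- ===== VERDICT (by name: the statement is the Claim_ definition above) =====
theorem virus_remover_spec : Claim_equal_virus_remover := by
  intro s _hdom hpre
  unfold Spec_virus_remover
  have hne : s.toList ≠ [] := by
    intro h
    exact hpre (by cases s with | _ l => simpa using congrArg String.ofList h)
  have hlen : s.length = s.toList.length := rfl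
  have hl : 1 ≤ s.length := by rw [hlen]; exact List.length_pos_iff.mpr hne
  obtain ⟨a, ha⟩ : ∃ a, PySem.Str.pyGet? s (-1) = some a := by
    simp [PySem.List.pyGet?, PySem.List.pyIdx?, hl]
    exact ⟨_, List.getElem?_eq_getElem (by omega)⟩
  obtain ⟨c, hc⟩ : ∃ c, PySem.Str.pyGet? s 0 = some c := by
    have h0 : 0 < s.length := hl
    simp [PySem.List.pyGet?, PySem.List.pyIdx?, h0]
  rw [virus_remover, virus_remover_alt, ha, hc]
  simp only [Option.getD_some, perWord]
  by_cases hd : a = '.'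
  · simp [hd, fix_eq]
  · simp [hd, fix_eq]
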